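-- pv_equiv track=rewrite | github.com/nursutopsakal-debug/K-s-ttan-mayanlar | src/scoring.py | _calculate_family_balance
-- ===== SOURCE A (Python) =====
-- def _calculate_family_balance(player_layout, guests_dict):
--     score = 0
--     families = {}
--
--     for table, guests in player_layout.items():
--         for guest_name in guests:
--             guest = guests_dict.get(guest_name)
--             if not guest:
--                 continue
--
--             for group in guest.get("groups", []):
--                 if "family" in group:
--                     families.setdefault(group, []).append((guest_name, table))
--
--     for members in families.values():
--         if len(members) > 1:
--             same_table = [m for m in members if m[1] == members[0][1]]
--             if len(same_table) == len(members):
--                 score += 15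
--             else:
--                 score -= 5
--
--     return score
-- ===== SOURCE B (Python) =====
-- def _calculate_family_balance(player_layout, guests_dict):
--     # One streaming pass: per family group keep (first_table, state) where state is
--     # None while the group has one member, else the all-same-table flag; the score
--     # is updated incrementally (+15 on becoming a consistent pair, -5 on becoming an
--     # inconsistent pair, -20 when a consistent group first breaks), so the second
--     # scoring loop of the original disappears.
--     score = 0
--     fams = {}
--     for table, guests in player_layout.items():
--         for guest_name in guests:
--             guest = guests_dict.get(guest_name)
--             if not guest:
--                 continue
--             for group in guest.get("groups", []):
--                 if "family" not in group:
--                     continue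
--                 rec = fams.get(group)
--                 if rec is None:
--                     fams[group] = (table, None)
--                 elif rec[1] is None:
--                     same = table == rec[0]
--                     score += 15 if same else -5
--                     fams[group] = (rec[0], same)
--                 elif rec[1] and table != rec[0]:
--                     score -= 20
--                     fams[group] = (rec[0], False)
--     return score
-- ===== Notes on version B (the rewrite author's own statement) =====
-- stated objective: alternative
-- what changed: Instead of accumulating per-family lists of (guest, table) pairs and scoring them in a second loop, B keeps only a (first table, consistency state) record per family and updates the score incrementally in the single grouping pass (+15 when a group becomes a consistent pair, -5 when it becomes an inconsistent pair, -20 when a consistent group first breaks), so the member lists and the whole second scoring loop disappear.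
import Mathlib
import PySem

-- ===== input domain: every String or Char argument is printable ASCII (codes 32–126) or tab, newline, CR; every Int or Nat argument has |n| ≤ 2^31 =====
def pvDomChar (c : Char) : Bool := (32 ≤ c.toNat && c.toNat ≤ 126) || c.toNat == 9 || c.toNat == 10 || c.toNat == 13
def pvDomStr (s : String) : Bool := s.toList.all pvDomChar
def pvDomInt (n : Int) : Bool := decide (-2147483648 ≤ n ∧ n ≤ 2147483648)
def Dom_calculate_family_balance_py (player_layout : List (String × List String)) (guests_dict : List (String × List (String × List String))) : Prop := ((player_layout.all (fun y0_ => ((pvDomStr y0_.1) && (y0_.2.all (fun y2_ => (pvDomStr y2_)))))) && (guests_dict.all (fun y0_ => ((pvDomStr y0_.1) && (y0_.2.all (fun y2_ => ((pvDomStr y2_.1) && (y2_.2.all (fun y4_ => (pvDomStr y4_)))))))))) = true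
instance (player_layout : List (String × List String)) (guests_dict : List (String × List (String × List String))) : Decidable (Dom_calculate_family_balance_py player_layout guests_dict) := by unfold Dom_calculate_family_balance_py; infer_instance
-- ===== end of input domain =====

-- B replaces A's two-phase algorithm (build per-family lists of (guest, table), then a second
-- scoring loop over them) by a single streaming pass that keeps only (first table, consistency
-- state) per family and updates the score incrementally; objective: alternative (same cost, no
-- second loop and no member lists).

-- ===== PORT A =====
-- guest = guests_dict.get(guest_name); if not guest: [] else guest.get("groups", [])
def pvGroupsOf (guests_dict : List (String × List (String × List String))) (guest_name : String) : List String :=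
  match List.lookup guest_name guests_dict with
  | none => []
  | some guest => if guest = [] then [] else (List.lookup "groups" guest).getD []

def calculate_family_balance_py (player_layout : List (String × List String)) (guests_dict : List (String × List (String × List String))) : Int :=
  let families : PySem.Dict String (List (String × String)) :=
    player_layout.foldl (fun fams tg =>
      tg.2.foldl (fun fams guest_name =>
        (pvGroupsOf guests_dict guest_name).foldl (fun fams group =>
          if PySem.Str.isIn "family" group then
            fams.modify group [] (fun ms => ms ++ [(guest_name, tg.1)])
          else fams) fams) fams) PySem.Dict.empty
  families.values.foldl (fun score members =>
    if 1 < members.length then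
      if (members.filter (fun m => m.2 == (PySem.List.pyGetD members 0 ("", "")).2)).length = members.length
      then score + 15 else score - 5
    else score) 0

-- ===== PORT B =====
def pvFamUpd (st : Int × PySem.Dict String (String × Option Bool)) (group table : String) : Int × PySem.Dict String (String × Option Bool) :=
  match st.2.get? group with
  | none => (st.1, st.2.insert group (table, (none : Option Bool)))
  | some (t, none) => (st.1 + (if table == t then 15 else -5), st.2.insert group (t, some (table == t)))
  | some (t, some ok) => if ok && !(table == t) then (st.1 - 20, st.2.insert group (t, some false)) else st

def calculate_family_balance_py_alt (player_layout : List (String × List String)) (guests_dict : List (String × List (String × List String))) : Int :=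
  (player_layout.foldl (fun st tg =>
    tg.2.foldl (fun st guest_name =>
      (pvGroupsOf guests_dict guest_name).foldl (fun st group =>
        if PySem.Str.isIn "family" group then pvFamUpd st group tg.1 else st) st) st)
    ((0 : Int), (PySem.Dict.empty : PySem.Dict String (String × Option Bool)))).1

-- ===== PRECONDITION & SPEC =====
def Spec_calculate_family_balance_py (player_layout : List (String × List String)) (guests_dict : List (String × List (String × List String))) (out : Int) : Prop := out = calculate_family_balance_py_alt player_layout guests_dict
instance (player_layout : List (String × List String)) (guests_dict : List (String × List (String × List String))) (out : Int) : Decidable (Spec_calculate_family_balance_py player_layout guests_dict out) := by unfold Spec_calculate_family_balance_py; infer_instance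

-- ===== CLAIM (what is proved, stated in full; the proofs are below) =====
def Claim_equal_calculate_family_balance_py : Prop := ∀ (player_layout : List (String × List String)) (guests_dict : List (String × List (String × List String))), Dom_calculate_family_balance_py player_layout guests_dict → Spec_calculate_family_balance_py player_layout guests_dict (calculate_family_balance_py player_layout guests_dict)

-- ===== LEMMAS AND PROOFS =====
def pvEvents (player_layout : List (String × List String)) (guests_dict : List (String × List (String × List String))) : List (String × String × String) :=
  player_layout.flatMap (fun tg => tg.2.flatMap (fun guest_name =>
    ((pvGroupsOf guests_dict guest_name).filter (fun group => PySem.Str.isIn "family" group)).map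
      (fun group => (group, guest_name, tg.1))))

def pvStepA (d : PySem.Dict String (List (String × String))) (e : String × String × String) : PySem.Dict String (List (String × String)) :=
  d.modify e.1 [] (fun ms => ms ++ [e.2])

def pvTablesE (evs : List (String × String × String)) (g : String) : List String :=
  (evs.filter (fun e => e.1 == g)).map (fun e => e.2.2)

def pvContribA (ms : List (String × String)) : Int :=
  if 1 < ms.length then (if (ms.filter (fun m => m.2 == (PySem.List.pyGetD ms 0 ("", "")).2)).length = ms.length then 15 else -5) else 0

def pvContribT : List String → Int
  | [] => 0
  | t :: ts => if ts = [] then 0 else if ts.all (fun x => x == t) then 15 else -5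

def pvScoreOf (evs : List (String × String × String)) : Int :=
  ((PySem.Set.ofList (evs.map (fun e => e.1))).map (fun g => pvContribT (pvTablesE evs g))).sum

theorem pv_nested_foldl {σ : Type} (pl : List (String × List String)) (gd : List (String × List (String × List String))) (f : σ → String × String × String → σ) (init : σ) :
  pl.foldl (fun st tg =>
    tg.2.foldl (fun st guest_name =>
      (pvGroupsOf gd guest_name).foldl (fun st group =>
        if PySem.Str.isIn "family" group then f st (group, guest_name, tg.1) else st) st) st) init
  = (pvEvents pl gd).foldl f init := by
  unfold pvEvents
  induction pl generalizing init with
  | nil => rfl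
  | cons tg tl ih =>
    simp only [List.foldl_cons, List.flatMap_cons, List.foldl_append, ih]
    congr 1
    induction tg.2 generalizing init with
    | nil => rfl
    | cons gn gtl ihg =>
      simp only [List.foldl_cons, List.flatMap_cons, List.foldl_append, ihg]
      congr 1
      rw [List.foldl_map, List.foldl_filter]

theorem pvA_flat (pl : List (String × List String)) (gd : List (String × List (String × List String))) :
  pl.foldl (fun fams tg =>
    tg.2.foldl (fun fams guest_name =>
      (pvGroupsOf gd guest_name).foldl (fun fams group =>
        if PySem.Str.isIn "family" group then
          fams.modify group [] (fun ms => ms ++ [(guest_name, tg.1)])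
        else fams) fams) fams) PySem.Dict.empty
  = (pvEvents pl gd).foldl pvStepA PySem.Dict.empty := by
  rw [← pv_nested_foldl pl gd pvStepA PySem.Dict.empty]
  simp only [pvStepA]

theorem contribA_eq (ms : List (String × String)) : pvContribA ms = pvContribT (ms.map (fun m => m.2)) := by
  cases ms with
  | nil => simp [pvContribA, pvContribT]
  | cons m rest =>
    cases rest with
    | nil => simp [pvContribA, pvContribT]
    | cons r rs =>
      have hget : PySem.List.pyGetD (m :: r :: rs) 0 ("", "") = m := by
        have h0 : (0:Int) ≤ (rs.length : Int) + 1 := by positivity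
        simp [PySem.List.pyGetD, PySem.List.pyGet?, PySem.List.pyIdx?, h0]
      have hlen : (1 : Nat) < (m :: r :: rs).length := by simp
      have hiff : ((m :: r :: rs).filter (fun x => x.2 == m.2)).length = (m :: r :: rs).length ↔
          (((r :: rs).map (fun x => x.2)).all (fun x => x == m.2) = true) := by
        rw [List.length_filter_eq_length_iff]
        simp [List.all_eq_true]
      rw [pvContribA, hget, List.map_cons]
      simp only [pvContribT]
      by_cases hall : (((r :: rs).map (fun x => x.2)).all (fun x => x == m.2) = true)
      · rw [if_pos hlen, if_pos (hiff.mpr hall), if_neg (by simp), if_pos hall]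
      · rw [if_pos hlen, if_neg (fun hcon => hall (hiff.mp hcon)), if_neg (by simp), if_neg hall]

theorem pvA_eq_score (pl : List (String × List String)) (gd : List (String × List (String × List String))) :
  calculate_family_balance_py pl gd = pvScoreOf (pvEvents pl gd) := by
  have hflat : calculate_family_balance_py pl gd
      = ((pvEvents pl gd).foldl pvStepA PySem.Dict.empty).values.foldl
          (fun score members =>
            if 1 < members.length then
              if (members.filter (fun m => m.2 == (PySem.List.pyGetD members 0 ("", "")).2)).length = members.length
              then score + 15 else score - 5
            else score) 0 := by
    unfold calculate_family_balance_py
    rw [pvA_flat]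
  set evs := pvEvents pl gd with hevs
  have hnd : ((evs.foldl pvStepA PySem.Dict.empty).keys).Nodup :=
    PySem.Dict.nodup_keys_foldl_modify_key evs (fun e => e.1) [] (fun _ e => fun ms => ms ++ [e.2]) PySem.Dict.empty (by simp)
  have hkeys : (evs.foldl pvStepA PySem.Dict.empty).keys = PySem.Set.ofList (evs.map (fun e => e.1)) := by
    have h := PySem.Dict.keys_foldl_modify_key evs (fun e => e.1) [] (fun _ e => fun ms => ms ++ [e.2]) PySem.Dict.empty
    simpa [PySem.Set.ofList] using h
  have hgetD : ∀ g, (evs.foldl pvStepA PySem.Dict.empty).getD g [] = (evs.filter (fun e => e.1 == g)).map (fun e => e.2) := by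
    intro g
    have h := PySem.Dict.getD_foldl_modify_append evs PySem.Dict.empty g
    simpa using h
  have hbody : (fun (score : Int) (members : List (String × String)) =>
      if 1 < members.length then
        if (members.filter (fun m => m.2 == (PySem.List.pyGetD members 0 ("", "")).2)).length = members.length
        then score + 15 else score - 5
      else score) = fun s ms => s + pvContribA ms := by
    funext s ms
    rw [pvContribA]
    split_ifs <;> ring
  rw [hflat, hbody, PySem.List.foldl_add,
    PySem.Dict.values_eq_map_keys _ hnd [], List.map_map, hkeys]
  have hfun : (pvContribA ∘ fun k => (evs.foldl pvStepA PySem.Dict.empty).getD k []) = fun g => pvContribT (pvTablesE evs g) := by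
    funext g
    simp only [Function.comp]
    rw [hgetD g, contribA_eq, List.map_map]
    rfl
  rw [hfun, pvScoreOf]
  simp

def pvStepB (st : Int × PySem.Dict String (String × Option Bool)) (e : String × String × String) : Int × PySem.Dict String (String × Option Bool) :=
  pvFamUpd st e.1 e.2.2

def pvEncode : List String → Option (String × Option Bool)
  | [] => none
  | t :: ts => some (t, if ts = [] then none else some (ts.all (fun x => x == t)))

theorem pvB_flat (pl : List (String × List String)) (gd : List (String × List (String × List String))) :
  pl.foldl (fun st tg =>
    tg.2.foldl (fun st guest_name =>
      (pvGroupsOf gd guest_name).foldl (fun st group =>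
        if PySem.Str.isIn "family" group then pvFamUpd st group tg.1 else st) st) st)
    ((0 : Int), (PySem.Dict.empty : PySem.Dict String (String × Option Bool)))
  = (pvEvents pl gd).foldl pvStepB ((0 : Int), PySem.Dict.empty) := by
  rw [← pv_nested_foldl pl gd pvStepB ((0 : Int), PySem.Dict.empty)]
  simp only [pvStepB]

theorem pvTablesE_append (evs : List (String × String × String)) (e : String × String × String) (g : String) :
    pvTablesE (evs ++ [e]) g = pvTablesE evs g ++ (if e.1 == g then [e.2.2] else []) := by
  simp only [pvTablesE, List.filter_append, List.map_append]
  congr 1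
  by_cases h : (e.1 == g) <;> simp [h]

theorem encode_eq_none (T : List String) : pvEncode T = none ↔ T = [] := by
  cases T <;> simp [pvEncode]

theorem encode_eq_single (T : List String) (t : String) : pvEncode T = some (t, none) ↔ T = [t] := by
  cases T with
  | nil => simp [pvEncode]
  | cons a ts =>
    cases ts with
    | nil => simp [pvEncode]
    | cons b ts' => simp [pvEncode]

theorem encode_eq_multi (T : List String) (t : String) (ok : Bool) :
    pvEncode T = some (t, some ok) ↔ ∃ ts, T = t :: ts ∧ ts ≠ [] ∧ ok = ts.all (fun x => x == t) := by
  cases T with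
  | nil => simp [pvEncode]
  | cons a ts =>
    cases ts with
    | nil => simp [pvEncode]
    | cons b ts' =>
      simp only [pvEncode, if_neg (by simp : ¬(b :: ts' = ([] : List String))), Option.some_inj, Prod.mk.injEq]
      constructor
      · rintro ⟨rfl, h⟩
        exact ⟨b :: ts', rfl, by simp, h.symm⟩
      · rintro ⟨ts2, heq, -, hok⟩
        injection heq with h1 h2
        subst h1; subst h2
        exact ⟨rfl, hok.symm⟩

theorem pvB_get? (evs : List (String × String × String)) :
    ∀ g, ((evs.foldl pvStepB ((0 : Int), PySem.Dict.empty)).2).get? g = pvEncode (pvTablesE evs g) := by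
  induction evs using List.reverseRecOn with
  | nil => intro g; simp [pvTablesE, pvEncode, PySem.Dict.get?_empty]
  | append_singleton es e ih =>
    intro g
    rw [List.foldl_append, List.foldl_cons, List.foldl_nil]
    set st := es.foldl pvStepB ((0 : Int), PySem.Dict.empty) with hst
    rw [pvTablesE_append]
    by_cases hg : g = e.1
    · subst hg
      rw [if_pos (by simp)]
      rcases hq : st.2.get? e.1 with _ | ⟨t, u⟩
      · have hT : pvTablesE es e.1 = [] := (encode_eq_none _).mp ((hq ▸ ih e.1).symm)
        rw [hT]
        simp only [pvStepB, pvFamUpd, hq]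
        simp [PySem.Dict.get?_insert_self, pvEncode]
      · rcases u with _ | ok
        · have hT : pvTablesE es e.1 = [t] := (encode_eq_single _ _).mp ((hq ▸ ih e.1).symm)
          rw [hT]
          simp only [pvStepB, pvFamUpd, hq]
          simp [PySem.Dict.get?_insert_self, pvEncode]
        · obtain ⟨ts, hT, hne, hok⟩ := (encode_eq_multi _ _ _).mp ((hq ▸ ih e.1).symm)
          rw [hT]
          simp only [pvStepB, pvFamUpd, hq]
          by_cases hc : (ok && !(e.2.2 == t)) = true
          · rw [if_pos hc]
            simp only [PySem.Dict.get?_insert_self, pvEncode]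
            have hall : ((ts ++ [e.2.2]).all fun x => x == t) = false := by
              rcases (Bool.and_eq_true ..).mp hc with ⟨hok1, hne1⟩
              simp only [Bool.not_eq_true'] at hne1
              simp [hne1]
            simp [hall]
          · rw [if_neg hc, hq]
            have hall : ((ts ++ [e.2.2]).all fun x => x == t) = ok := by
              rw [hok]
              rcases hok2 : ts.all (fun x => x == t) with _ | _
              · simp [hok2]
              · have hte : (e.2.2 == t) = true := by
                  rcases hte2 : (e.2.2 == t) with _ | _
                  · exact absurd (by rw [hok, hok2, hte2]; rfl) hc
                  · rfl
                simp [hok2, hte]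
            simp [pvEncode, hall]
    · rw [if_neg (by simpa using Ne.symm hg)]
      rcases hq : st.2.get? e.1 with _ | ⟨t, u⟩
      · simp only [pvStepB, pvFamUpd, hq]
        rw [PySem.Dict.get?_insert_of_ne _ _ hg, ih g, List.append_nil]
      · rcases u with _ | ok
        · simp only [pvStepB, pvFamUpd, hq]
          rw [PySem.Dict.get?_insert_of_ne _ _ hg, ih g, List.append_nil]
        · simp only [pvStepB, pvFamUpd, hq]
          by_cases hc : (ok && !(e.2.2 == t)) = true
          · rw [if_pos hc, PySem.Dict.get?_insert_of_ne _ _ hg, ih g, List.append_nil]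
          · rw [if_neg hc, ih g, List.append_nil]

theorem pv_sum_update (S : List String) (hnd : S.Nodup) (f f' : String → Int) (g0 : String) (hg : g0 ∈ S)
    (h : ∀ g ∈ S, g ≠ g0 → f' g = f g) :
    (S.map f').sum = (S.map f).sum + (f' g0 - f g0) := by
  induction S with
  | nil => simp at hg
  | cons a S ih =>
    rcases List.mem_cons.mp hg with rfl | hmem
    · have : ∀ g ∈ S, f' g = f g := fun g hgS => h g (List.mem_cons_of_mem _ hgS) (by rintro rfl; exact (List.nodup_cons.mp hnd).1 hgS)
      simp only [List.map_cons, List.sum_cons, List.map_congr_left this]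
      ring
    · have ha : f' a = f a := h a (List.mem_cons_self) (by rintro rfl; exact (List.nodup_cons.mp hnd).1 hmem)
      simp only [List.map_cons, List.sum_cons, ih (List.nodup_cons.mp hnd).2 hmem
        (fun g hgS hne => h g (List.mem_cons_of_mem _ hgS) hne), ha]
      ring

theorem pv_tables_nil_iff (evs : List (String × String × String)) (g : String) :
    pvTablesE evs g = [] ↔ ¬ g ∈ evs.map (fun e => e.1) := by
  simp only [pvTablesE, List.map_eq_nil_iff, List.filter_eq_nil_iff, List.mem_map]
  constructor
  · rintro h ⟨e, hmem, rfl⟩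
    exact absurd (by simp) (h e hmem)
  · intro h e hmem
    simp only [beq_iff_eq]
    exact fun hx => h ⟨e, hmem, hx⟩

theorem contribT_cons (t : String) (ts : List String) :
    pvContribT (t :: ts) = if ts = [] then 0 else if ts.all (fun x => x == t) then 15 else -5 := rfl

theorem pvB_score (evs : List (String × String × String)) :
    (evs.foldl pvStepB ((0 : Int), PySem.Dict.empty)).1 = pvScoreOf evs := by
  induction evs using List.reverseRecOn with
  | nil => simp [pvScoreOf]
  | append_singleton es e ih =>
    rw [List.foldl_append, List.foldl_cons, List.foldl_nil]
    set st := es.foldl pvStepB ((0 : Int), PySem.Dict.empty) with hst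
    have hget := pvB_get? es e.1
    rw [← hst] at hget
    rw [pvScoreOf] at ih
    have hS' : PySem.Set.ofList ((es ++ [e]).map (fun x => x.1)) = PySem.Set.add (PySem.Set.ofList (es.map (fun x => x.1))) e.1 := by
      simp [PySem.Set.ofList]
    have hfeq : ∀ g ∈ PySem.Set.ofList (es.map (fun x => x.1)), g ≠ e.1 →
        pvContribT (pvTablesE (es ++ [e]) g) = pvContribT (pvTablesE es g) := by
      intro g _ hgne
      rw [pvTablesE_append, if_neg (by simpa using Ne.symm hgne), List.append_nil]
    by_cases hm : e.1 ∈ PySem.Set.ofList (es.map (fun x => x.1))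
    · -- group already seen
      have hTne : pvTablesE es e.1 ≠ [] := by
        rw [Ne, pv_tables_nil_iff]
        simpa using (PySem.Set.mem_ofList _ _).mp hm
      rcases hT : pvTablesE es e.1 with _ | ⟨t, ts⟩
      · exact absurd hT hTne
      have hRHS : pvScoreOf (es ++ [e]) =
          ((PySem.Set.ofList (es.map (fun x => x.1))).map (fun g => pvContribT (pvTablesE es g))).sum
          + (pvContribT (pvTablesE (es ++ [e]) e.1) - pvContribT (pvTablesE es e.1)) := by
        rw [pvScoreOf, hS', PySem.Set.add, if_pos (by simpa [PySem.Set.contains] using hm)]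
        exact pv_sum_update _ (PySem.Set.nodup_ofList _) _ _ e.1 hm hfeq
      rw [hRHS, ← ih, pvTablesE_append, if_pos (by simp), hT]
      rw [hT] at hget
      cases ts with
      | nil =>
        simp only [pvStepB, pvFamUpd, hget, pvEncode]
        simp only [pvContribT, List.cons_append, List.nil_append]
        by_cases hx : (e.2.2 == t) = true <;> simp [hx]
      | cons b ts' =>
        have hgetBool : st.2.get? e.1 = some (t, some ((b :: ts').all fun x => x == t)) := by
          rw [hget]; simp [pvEncode]
        have holdc : pvContribT (t :: b :: ts') = if ((b :: ts').all fun x => x == t) then 15 else -5 := by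
          rw [contribT_cons, if_neg (by simp)]
        have hnewall : ((b :: (ts' ++ [e.2.2])).all fun x => x == t) = (((b :: ts').all fun x => x == t) && (e.2.2 == t)) := by
          rw [show b :: (ts' ++ [e.2.2]) = (b :: ts') ++ [e.2.2] from (List.cons_append ..).symm, List.all_append]
          simp
        have hnewc : pvContribT (t :: (b :: (ts' ++ [e.2.2]))) = if (((b :: ts').all fun x => x == t) && (e.2.2 == t)) then 15 else -5 := by
          rw [contribT_cons, if_neg (by simp), hnewall]
        simp only [List.cons_append]
        rw [holdc, hnewc]
        rcases hok2 : ((b :: ts').all fun x => x == t) with _|_ <;>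
          rw [hok2] at hgetBool <;>
          rcases hte : (e.2.2 == t) with _|_ <;>
          simp [pvStepB, pvFamUpd, hgetBool, hte] <;> ring
    · -- new group
      have hT : pvTablesE es e.1 = [] := by
        rw [pv_tables_nil_iff]
        intro hmem
        exact hm ((PySem.Set.mem_ofList _ _).mpr hmem)
      rw [hT] at hget
      have hget' : st.2.get? e.1 = none := by rw [hget]; rfl
      simp only [pvStepB, pvFamUpd, hget']
      rw [pvScoreOf, hS', PySem.Set.add, if_neg (by simpa [PySem.Set.contains] using hm)]
      rw [List.map_append, List.sum_append]
      have hmap : (PySem.Set.ofList (es.map (fun x => x.1))).map (fun g => pvContribT (pvTablesE (es ++ [e]) g))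
          = (PySem.Set.ofList (es.map (fun x => x.1))).map (fun g => pvContribT (pvTablesE es g)) :=
        List.map_congr_left (fun g hgS => hfeq g hgS (by rintro rfl; exact hm hgS))
      rw [hmap, ← ih]
      have : pvContribT (pvTablesE (es ++ [e]) e.1) = 0 := by
        rw [pvTablesE_append, if_pos (by simp), hT]
        simp [pvContribT]
      simp [this]

theorem pvB_eq_score (pl : List (String × List String)) (gd : List (String × List (String × List String))) :
  calculate_family_balance_py_alt pl gd = pvScoreOf (pvEvents pl gd) := by
  unfold calculate_family_balance_py_alt
  rw [pvB_flat]
  exact pvB_score _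

-- ===== VERDICT (by name: the statement is the Claim_ definition above) =====
theorem calculate_family_balance_py_spec : Claim_equal_calculate_family_balance_py := by
  intro pl gd _
  unfold Spec_calculate_family_balance_py
  rw [pvA_eq_score, pvB_eq_score]
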